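-- pv_equiv track=rewrite | github.com/LucasPruijssers/AOC-2024 | day-2/question4.py | checkAllCombinations
-- ===== SOURCE A (Python) =====
-- def is_ascending(input):
--     for i in range(len(input) - 1):
--         if(int(input[i]) == int(input[i+1])):
--             return False
--         if(int(input[i]) > int(input[i+1])):
--             return False
--         if (abs(int(input[i]) - int(input[i+1])) > 3):
--             return False
--     return True
--
-- def is_descending(input):
--     for i in range(len(input) - 1):
--         if(int(input[i]) == int(input[i+1])):
--             return False
--         if(int(input[i]) < int(input[i+1])):
--             return False
--         if (abs(int(input[i]) - int(input[i+1]) > 3)):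
--             return False
--     return True
--
-- def checkAllCombinations(list):
--     count = 0
--     # list contains couple strings of stuff
--     for entry in list:
--         combinations = []
--         for i in range(len(entry)) :
--             copy = entry.copy()
--             copy.pop(i)
--             combinations.append(copy)
--
--         for combination in combinations:
--             if(question1(combination)):
--                 count += 1
--                 break
--     return count
--
-- def question1(line):
--     if(is_ascending(line) or is_descending(line)):
--         return True
--     else:
--         return False
-- ===== SOURCE B (Python) =====
-- # Linear-pass re-implementation: per line, find the first violating adjacent pair
-- # for each direction and only try removing one of its two endpoints (O(n) per line
-- # instead of A's O(n^2) try-every-removal scan). Empty lines admit no removal, so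
-- # they are not counted (same as A).
--
-- def _asc_ok(a, b):
--     return 0 < b - a <= 3
--
-- def _desc_ok(a, b):
--     return 0 < a - b <= 3
--
-- def _valid(xs, ok):
--     return all(ok(a, b) for a, b in zip(xs, xs[1:]))
--
-- def _first_bad(xs, ok):
--     for i in range(len(xs) - 1):
--         if not ok(xs[i], xs[i + 1]):
--             return i
--     return None
--
-- def _drop_at(xs, i):
--     return xs[:i] + xs[i + 1:]
--
-- def _tolerant(xs, ok):
--     i = _first_bad(xs, ok)
--     if i is None:
--         return True
--     return _valid(_drop_at(xs, i), ok) or _valid(_drop_at(xs, i + 1), ok)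
--
-- def checkAllCombinations(list):
--     count = 0
--     for entry in list:
--         if entry and (_tolerant(entry, _asc_ok) or _tolerant(entry, _desc_ok)):
--             count += 1
--     return count
-- ===== Notes on version B (the rewrite author's own statement) =====
-- stated objective: faster
-- what changed: Per line, instead of generating every one-element-removed copy and re-scanning each, B makes one linear pass per direction, locates the first violating adjacent pair and only tests removing one of its two endpoints.
import Mathlib
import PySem

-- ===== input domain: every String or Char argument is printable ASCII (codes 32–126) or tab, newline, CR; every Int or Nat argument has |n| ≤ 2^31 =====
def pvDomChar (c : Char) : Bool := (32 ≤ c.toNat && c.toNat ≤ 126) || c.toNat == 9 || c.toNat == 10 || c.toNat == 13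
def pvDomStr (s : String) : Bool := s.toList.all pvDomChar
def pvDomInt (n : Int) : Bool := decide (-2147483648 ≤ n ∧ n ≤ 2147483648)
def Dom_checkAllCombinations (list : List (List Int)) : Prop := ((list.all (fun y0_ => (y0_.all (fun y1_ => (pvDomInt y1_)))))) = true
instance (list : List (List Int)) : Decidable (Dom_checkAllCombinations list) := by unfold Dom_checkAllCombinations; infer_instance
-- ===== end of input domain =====

-- B replaces A's try-every-one-element-removal scan per line by a linear pass that
-- locates the first violating adjacent pair per direction and only tests removing
-- one of its two endpoints (objective: faster, O(n) per line vs A's O(n^2)).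

-- ===== PORT A =====

-- for i in range(len(input) - 1): input[i], input[i+1] are the successive adjacent
-- pairs, so the index loop is recursion over the list's adjacent pairs
def is_ascending : List Int → Bool
  | a :: b :: t =>
    if a = b then false
    else if a > b then false
    else if (a - b).natAbs > 3 then false
    else is_ascending (b :: t)
  | _ => true

-- third branch is Python's `abs(a - b > 3)`: abs of a BOOL, truthy exactly when a - b > 3
def is_descending : List Int → Bool
  | a :: b :: t =>
    if a = b then false
    else if a < b then false
    else if a - b > 3 then false
    else is_descending (b :: t)
  | _ => true

def question1 (line : List Int) : Bool :=
  if is_ascending line || is_descending line then true else false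

-- `for combination in combinations: if question1(...): count += 1; break`
def firstSafeCount : List (List Int) → Int
  | [] => 0
  | c :: rest => if question1 c then 1 else firstSafeCount rest

def checkAllCombinations (list : List (List Int)) : Int :=
  list.foldl (fun count entry =>
    -- copy = entry.copy(); copy.pop(i); combinations.append(copy)
    let combinations := (List.range entry.length).map (fun i => entry.eraseIdx i)
    count + firstSafeCount combinations) 0

-- ===== PORT B =====

def ascOk (a b : Int) : Bool := 0 < b - a && b - a ≤ 3

def descOk (a b : Int) : Bool := 0 < a - b && a - b ≤ 3

-- all(ok(a, b) for a, b in zip(xs, xs[1:]))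
def validB (ok : Int → Int → Bool) (xs : List Int) : Bool :=
  (xs.zip xs.tail).all (fun p => ok p.1 p.2)

-- for i in range(len(xs) - 1): if not ok(...): return i   (i carried as accumulator)
def firstBadGo (ok : Int → Int → Bool) : List Int → Nat → Option Nat
  | a :: b :: t, i => if ok a b then firstBadGo ok (b :: t) (i+1) else some i
  | _, _ => none

def firstBad (ok : Int → Int → Bool) (xs : List Int) : Option Nat := firstBadGo ok xs 0

-- _drop_at(xs, i) = xs[:i] + xs[i+1:] = eraseIdx i (exact for 0 ≤ i)
def tolerant (ok : Int → Int → Bool) (xs : List Int) : Bool :=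
  match firstBad ok xs with
  | none => true
  | some i => validB ok (xs.eraseIdx i) || validB ok (xs.eraseIdx (i+1))

def checkAllCombinations_alt (list : List (List Int)) : Int :=
  list.foldl (fun count entry =>
    if !entry.isEmpty && (tolerant ascOk entry || tolerant descOk entry)
    then count + 1 else count) 0

-- ===== PRECONDITION & SPEC =====
def Spec_checkAllCombinations (list : List (List Int)) (out : Int) : Prop := out = checkAllCombinations_alt list
instance (list : List (List Int)) (out : Int) : Decidable (Spec_checkAllCombinations list out) := by unfold Spec_checkAllCombinations; infer_instance

-- ===== CLAIM (what is proved, stated in full; the proofs are below) =====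
def Claim_equal_checkAllCombinations : Prop := ∀ (list : List (List Int)), Dom_checkAllCombinations list → Spec_checkAllCombinations list (checkAllCombinations list)

-- ===== LEMMAS AND PROOFS =====

-- all adjacent pairs of xs satisfy ok
def PairsOk (ok : Int → Int → Bool) (xs : List Int) : Prop :=
  ∀ k, (h : k + 1 < xs.length) → ok (xs[k]'(by omega)) xs[k+1] = true

theorem validB_nil (ok : Int → Int → Bool) : validB ok [] = true := rfl

theorem validB_single (ok : Int → Int → Bool) (a : Int) : validB ok [a] = true := rfl

theorem validB_cons_cons (ok : Int → Int → Bool) (a b : Int) (t : List Int) :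
    validB ok (a :: b :: t) = (ok a b && validB ok (b :: t)) := by
  simp [validB]

theorem validB_iff_pairsOk (ok : Int → Int → Bool) (xs : List Int) :
    validB ok xs = true ↔ PairsOk ok xs := by
  induction xs with
  | nil => simp [validB_nil, PairsOk]
  | cons a t ih =>
    cases t with
    | nil =>
      simp only [validB_single, PairsOk, List.length_cons, List.length_nil]
      constructor
      · intro _ k h; omega
      · intro _; trivial
    | cons b t' =>
      rw [validB_cons_cons, Bool.and_eq_true, ih]
      constructor
      · rintro ⟨hab, hrest⟩ k h
        cases k with
        | zero => simpa using hab
        | succ k' =>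
          have := hrest k' (by simpa using h)
          simpa using this
      · intro h
        refine ⟨by simpa using h 0 (by simp), ?_⟩
        intro k hk
        have := h (k+1) (by simpa using hk)
        simpa using this

-- A's ascending-branch conditions coincide with ascOk
theorem ascBranch_eq (a b : Int) :
    ((!decide (a = b)) && (!decide (a > b)) && (!decide ((a - b).natAbs > 3))) = ascOk a b := by
  simp only [ascOk]
  by_cases h1 : a = b <;> by_cases h2 : a > b <;> by_cases h3 : (a - b).natAbs > 3 <;>
    simp [h1, h2, h3] <;> omega

theorem descBranch_eq (a b : Int) :
    ((!decide (a = b)) && (!decide (a < b)) && (!decide (a - b > 3))) = descOk a b := by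
  simp only [descOk]
  by_cases h1 : a = b <;> by_cases h2 : a < b <;> by_cases h3 : a - b > 3 <;>
    simp [h1, h2, h3] <;> omega

theorem is_ascending_eq_validB (xs : List Int) : is_ascending xs = validB ascOk xs := by
  induction xs with
  | nil => rfl
  | cons a t ih =>
    cases t with
    | nil => rfl
    | cons b t' =>
      rw [is_ascending, validB_cons_cons, ← ih, ← ascBranch_eq]
      by_cases h1 : a = b <;> by_cases h2 : a > b <;>
        by_cases h3 : (a - b).natAbs > 3 <;> simp [h1, h2, h3]

theorem is_descending_eq_validB (xs : List Int) : is_descending xs = validB descOk xs := by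
  induction xs with
  | nil => rfl
  | cons a t ih =>
    cases t with
    | nil => rfl
    | cons b t' =>
      rw [is_descending, validB_cons_cons, ← ih, ← descBranch_eq]
      by_cases h1 : a = b <;> by_cases h2 : a < b <;>
        by_cases h3 : a - b > 3 <;> simp [h1, h2, h3]

theorem question1_eq (c : List Int) :
    question1 c = (validB ascOk c || validB descOk c) := by
  rw [question1, is_ascending_eq_validB, is_descending_eq_validB]
  split <;> simp_all

theorem firstBadGo_none_iff (ok : Int → Int → Bool) (xs : List Int) (i : Nat) :
    firstBadGo ok xs i = none ↔ validB ok xs = true := by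
  induction xs generalizing i with
  | nil => simp [firstBadGo, validB_nil]
  | cons a t ih =>
    cases t with
    | nil => simp [firstBadGo, validB_single]
    | cons b t' =>
      rw [firstBadGo, validB_cons_cons]
      by_cases hok : ok a b = true
      · rw [if_pos hok, ih (i+1), hok]; simp
      · rw [if_neg hok]
        simp only [Bool.not_eq_true] at hok
        simp [hok]

theorem firstBadGo_some (ok : Int → Int → Bool) (xs : List Int) (i j : Nat)
    (h : firstBadGo ok xs i = some j) :
    ∃ k, j = i + k ∧ ∃ (hk : k + 1 < xs.length), ok (xs[k]'(by omega)) xs[k+1] = false := by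
  induction xs generalizing i j with
  | nil => simp [firstBadGo] at h
  | cons a t ih =>
    cases t with
    | nil => simp [firstBadGo] at h
    | cons b t' =>
      rw [firstBadGo] at h
      by_cases hok : ok a b = true
      · rw [if_pos hok] at h
        obtain ⟨k, hjk, hk, hbad⟩ := ih (i+1) j h
        exact ⟨k + 1, by omega, by simpa using hk, by simpa using hbad⟩
      · rw [if_neg hok] at h
        cases h
        exact ⟨0, by omega, by simp, by simpa using hok⟩

-- a bad adjacent pair survives the removal of any element outside it
theorem not_pairsOk_eraseIdx (ok : Int → Int → Bool) (xs : List Int) (i j : Nat)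
    (hi : i + 1 < xs.length) (hbad : ok (xs[i]'(by omega)) xs[i+1] = false)
    (hj : j < xs.length) (hji : j ≠ i) (hji1 : j ≠ i + 1) :
    ¬ PairsOk ok (xs.eraseIdx j) := by
  intro hp
  have hlen : (xs.eraseIdx j).length = xs.length - 1 := by
    simp [List.length_eraseIdx, hj]
  rcases Nat.lt_or_ge j i with hlt | hge
  · -- j < i: the pair sits at positions (i-1, i) of the erased list
    have hk : (i - 1) + 1 < (xs.eraseIdx j).length := by omega
    have := hp (i - 1) hk
    rw [List.getElem_eraseIdx, List.getElem_eraseIdx] at this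
    rw [dif_neg (by omega), dif_neg (by omega)] at this
    have e1 : i - 1 + 1 = i := by omega
    have e2 : i - 1 + 1 + 1 = i + 1 := by omega
    simp only [e1] at this
    rw [hbad] at this; exact absurd this (by simp)
  · -- j > i + 1: the pair stays at positions (i, i+1)
    have hgt : i + 1 < j := by omega
    have hk : i + 1 < (xs.eraseIdx j).length := by omega
    have := hp i hk
    rw [List.getElem_eraseIdx, List.getElem_eraseIdx] at this
    rw [dif_pos (by omega), dif_pos (by omega)] at this
    rw [hbad] at this; exact absurd this (by simp)

-- pairs of the tail are pairs of the list: valid xs → valid (eraseIdx 0 xs)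
theorem pairsOk_tail (ok : Int → Int → Bool) (xs : List Int) (h : PairsOk ok xs) :
    PairsOk ok xs.tail := by
  cases xs with
  | nil => intro k hk; simp at hk
  | cons a t =>
    intro k hk
    have := h (k+1) (by simpa using hk)
    simpa using this

-- the heart of the equivalence: B's single-pass tolerance = "some removal is valid"
theorem tolerant_iff_exists (ok : Int → Int → Bool) (xs : List Int) (hne : xs ≠ []) :
    tolerant ok xs = true ↔ ∃ i, i < xs.length ∧ validB ok (xs.eraseIdx i) = true := by
  rw [tolerant]
  cases hfb : firstBad ok xs with
  | none =>
    simp only [true_iff]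
    refine ⟨0, by cases xs <;> simp_all, ?_⟩
    rw [List.eraseIdx_zero, validB_iff_pairsOk]
    apply pairsOk_tail
    rw [← validB_iff_pairsOk]
    exact (firstBadGo_none_iff ok xs 0).mp hfb
  | some i =>
    obtain ⟨k, hik, hk, hbadk⟩ := firstBadGo_some ok xs 0 i hfb
    have hik' : k = i := by omega
    have hi : i + 1 < xs.length := hik' ▸ hk
    have hbad : ok (xs[i]'(by omega)) (xs[i+1]'hi) = false := by
      subst hik'; exact hbadk
    constructor
    · intro h
      rcases Bool.or_eq_true_iff.mp h with h' | h'
      · exact ⟨i, by omega, h'⟩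
      · exact ⟨i + 1, by omega, h'⟩
    · rintro ⟨j, hj, hv⟩
      by_cases hji : j = i
      · subst hji; simp [hv]
      by_cases hji1 : j = i + 1
      · subst hji1; simp [hv]
      exact absurd ((validB_iff_pairsOk ok _).mp hv)
        (not_pairsOk_eraseIdx ok xs i j hi hbad hj hji hji1)

-- A's per-line count in closed "any" form
theorem firstSafeCount_eq_any (cs : List (List Int)) :
    firstSafeCount cs = if cs.any question1 then 1 else 0 := by
  induction cs with
  | nil => simp [firstSafeCount]
  | cons c rest ih =>
    rw [firstSafeCount, List.any_cons]
    by_cases h : question1 c = true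
    · simp [h]
    · simp only [Bool.not_eq_true] at h
      simp [h, ih]

-- the per-entry values of the two folds coincide
theorem perEntry_eq (e : List Int) :
    firstSafeCount ((List.range e.length).map (fun i => e.eraseIdx i)) =
      (if !e.isEmpty && (tolerant ascOk e || tolerant descOk e) then (1 : Int) else 0) := by
  cases he : e with
  | nil => simp [firstSafeCount]
  | cons a t =>
    rw [← he, firstSafeCount_eq_any]
    have hne : e ≠ [] := by rw [he]; simp
    have hbools : ((List.range e.length).map (fun i => e.eraseIdx i)).any question1 =
        (!e.isEmpty && (tolerant ascOk e || tolerant descOk e)) := by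
      rw [Bool.eq_iff_iff]
      simp only [List.any_eq_true, List.mem_map, List.mem_range, Bool.and_eq_true,
        Bool.not_eq_true', Bool.or_eq_true_iff]
      constructor
      · rintro ⟨c, ⟨i, hi, rfl⟩, hq⟩
        rw [question1_eq, Bool.or_eq_true_iff] at hq
        refine ⟨by simp [he], ?_⟩
        rcases hq with hq | hq
        · exact Or.inl ((tolerant_iff_exists ascOk e hne).mpr ⟨i, hi, hq⟩)
        · exact Or.inr ((tolerant_iff_exists descOk e hne).mpr ⟨i, hi, hq⟩)
      · rintro ⟨-, hq⟩
        rcases hq with hq | hq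
        · obtain ⟨i, hi, hv⟩ := (tolerant_iff_exists ascOk e hne).mp hq
          exact ⟨e.eraseIdx i, ⟨i, hi, rfl⟩, by rw [question1_eq]; simp [hv]⟩
        · obtain ⟨i, hi, hv⟩ := (tolerant_iff_exists descOk e hne).mp hq
          exact ⟨e.eraseIdx i, ⟨i, hi, rfl⟩, by rw [question1_eq]; simp [hv]⟩
    rw [hbools]

theorem folds_eq (list : List (List Int)) (c : Int) :
    list.foldl (fun count entry =>
      let combinations := (List.range entry.length).map (fun i => entry.eraseIdx i)
      count + firstSafeCount combinations) c =
    list.foldl (fun count entry =>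
      if !entry.isEmpty && (tolerant ascOk entry || tolerant descOk entry)
      then count + 1 else count) c := by
  induction list generalizing c with
  | nil => rfl
  | cons e rest ih =>
    simp only [List.foldl_cons]
    rw [perEntry_eq e]
    split
    · exact ih _
    · simpa using ih c

-- ===== VERDICT (by name: the statement is the Claim_ definition above) =====
theorem checkAllCombinations_spec : Claim_equal_checkAllCombinations := by
  intro list _
  show checkAllCombinations list = checkAllCombinations_alt list
  rw [checkAllCombinations, checkAllCombinations_alt]
  exact folds_eq list 0
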